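-- pv_equiv track=rewrite | github.com/SylarBurns/CodingTestPrep | FullSearch/모의고사.py | solution
-- ===== SOURCE A (Python) =====
-- def solution(answers):
--     answer = []
--     correct_count = []
--     for i in range(1,4):
--         correct_count.append([0,i])
--     routines = [
--         [1, 2, 3, 4, 5],
--         [2, 1, 2, 3, 2, 4, 2, 5],
--         [3, 3, 1, 1, 2, 2, 4, 4, 5, 5]
--         ]
--     for i, routine in enumerate(routines):
--         for j, ans in enumerate(answers):
--             if ans == routine[j%len(routine)]:
--                 correct_count[i][0]+=1
--     correct_count.sort(reverse=True)
--     max_count = correct_count[0][0]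
--     answer.append(correct_count[0][1])
--     correct_count.pop(0)
--     while correct_count:
--         temp = correct_count.pop(0)
--         if max_count == temp[0]:
--             answer.append(temp[1])
--         else:
--             break
--     answer.sort()
--     return answer
-- ===== SOURCE B (Python) =====
-- def solution(answers):
--     p1 = [1, 2, 3, 4, 5]
--     p2 = [2, 1, 2, 3, 2, 4, 2, 5]
--     p3 = [3, 3, 1, 1, 2, 2, 4, 4, 5, 5]
--     s1 = s2 = s3 = 0
--     for j, a in enumerate(answers):
--         if a == p1[j % 5]:
--             s1 += 1
--         if a == p2[j % 8]:
--             s2 += 1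
--         if a == p3[j % 10]:
--             s3 += 1
--     m = max(s1, s2, s3)
--     return [i for i, s in ((1, s1), (2, s2), (3, s3)) if s == m]
-- ===== Notes on version B (the rewrite author's own statement) =====
-- stated objective: simpler
-- what changed: Replaces A's three separate scans of answers, the [0,i]-pair list, reverse-sort, pop(0)/while-pop tie collection and final sort by a single pass over answers maintaining three score counters followed by max-then-filter (one traversal instead of three, no sorting), which yields the ascending result directly.
import Mathlib
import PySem

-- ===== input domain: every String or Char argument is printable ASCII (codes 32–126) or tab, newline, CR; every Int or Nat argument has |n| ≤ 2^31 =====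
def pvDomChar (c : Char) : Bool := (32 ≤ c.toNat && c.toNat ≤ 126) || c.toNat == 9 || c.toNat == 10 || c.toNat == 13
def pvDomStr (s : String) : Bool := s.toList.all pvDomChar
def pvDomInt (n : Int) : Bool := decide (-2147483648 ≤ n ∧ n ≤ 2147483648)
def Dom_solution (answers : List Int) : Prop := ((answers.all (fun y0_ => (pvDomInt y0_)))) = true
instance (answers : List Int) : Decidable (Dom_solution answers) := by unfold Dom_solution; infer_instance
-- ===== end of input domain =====

-- B replaces A's three scans + reverse-sort + pop-based tie collection by one pass over the
-- answers maintaining the three scores, then max-and-filter (objective: simpler). Return values only.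

-- ===== PORT A =====
-- the 'while correct_count: temp = correct_count.pop(0); …' loop of A
def popLoop (m : Int) : List (Int × Int) → List Int → List Int
  | [], ans => ans
  | t :: r, ans => if m = t.1 then popLoop m r (ans ++ [t.2]) else ans

def solution (answers : List Int) : List Int :=
  -- correct_count = [[0, i] for i in range(1, 4)]  (2-element int lists ported as pairs)
  let correct_count : List (Int × Int) :=
    (PySem.List.pyRange 1 4 1).foldl (fun acc i => acc ++ [((0 : Int), i)]) []
  let routines : List (List Int) :=
    [[1, 2, 3, 4, 5], [2, 1, 2, 3, 2, 4, 2, 5], [3, 3, 1, 1, 2, 2, 4, 4, 5, 5]]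
  -- nested for loops; routine[j % len(routine)] is exact via pyGetD (index always in range);
  -- correct_count[i][0] += 1 is List.modify at i (i from enumerate is ≥ 0, so .toNat is exact)
  let correct_count :=
    (PySem.List.enumerate routines).foldl (fun cc ir =>
      (PySem.List.enumerate answers).foldl (fun cc ja =>
        if ja.2 = PySem.List.pyGetD ir.2 (PySem.Int.mod ja.1 (ir.2.length : Int)) 0
        then cc.modify ir.1.toNat (fun p => (p.1 + 1, p.2)) else cc) cc) correct_count
  -- correct_count.sort(reverse=True); then take the head and collect ties, then sort ascending
  match PySem.List.sorted2 correct_count (·.1) (·.2) true with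
  | [] => []   -- unreachable: correct_count always has 3 entries (Python raises IndexError on [])
  | top :: rest => PySem.List.sorted (popLoop top.1 rest [top.2]) (fun x => x) false

-- ===== PORT B =====
def solution_alt (answers : List Int) : List Int :=
  let p1 : List Int := [1, 2, 3, 4, 5]
  let p2 : List Int := [2, 1, 2, 3, 2, 4, 2, 5]
  let p3 : List Int := [3, 3, 1, 1, 2, 2, 4, 4, 5, 5]
  -- one pass over enumerate(answers) carrying the three scores (pyGetD exact: index in range)
  let s :=
    (PySem.List.enumerate answers).foldl (fun (s : Int × Int × Int) ja =>
      (if ja.2 = PySem.List.pyGetD p1 (PySem.Int.mod ja.1 5) 0 then s.1 + 1 else s.1,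
       if ja.2 = PySem.List.pyGetD p2 (PySem.Int.mod ja.1 8) 0 then s.2.1 + 1 else s.2.1,
       if ja.2 = PySem.List.pyGetD p3 (PySem.Int.mod ja.1 10) 0 then s.2.2 + 1 else s.2.2))
      ((0 : Int), (0 : Int), (0 : Int))
  let m := max s.1 (max s.2.1 s.2.2)
  ([((1 : Int), s.1), (2, s.2.1), (3, s.2.2)].filter (fun p => p.2 == m)).map (·.1)

-- ===== PRECONDITION & SPEC =====
def Spec_solution (answers : List Int) (out : List Int) : Prop := out = solution_alt answers
instance (answers : List Int) (out : List Int) : Decidable (Spec_solution answers out) := by unfold Spec_solution; infer_instance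

-- ===== CLAIM (what is proved, stated in full; the proofs are below) =====
def Claim_equal_solution : Prop := ∀ (answers : List Int), Dom_solution answers → Spec_solution answers (solution answers)

-- ===== LEMMAS AND PROOFS =====

-- number of hits of pattern r (cycled with modulus m) on an enumerated answer list
def cnt (r : List Int) (m : Int) : List (Int × Int) → Int
  | [] => 0
  | ja :: l => (if ja.2 = PySem.List.pyGetD r (PySem.Int.mod ja.1 m) 0 then 1 else 0) + cnt r m l

lemma modify_modify {α : Type} (f g : α → α) : ∀ (cc : List α) (i : Nat),
    (cc.modify i f).modify i g = cc.modify i (fun x => g (f x))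
  | [], _ => by simp
  | x :: cc, 0 => by simp
  | x :: cc, i + 1 => by simp [modify_modify f g cc i]

lemma modify_id' {α : Type} (f : α → α) (h : ∀ x, f x = x) : ∀ (cc : List α) (i : Nat),
    cc.modify i f = cc
  | [], _ => by simp
  | x :: cc, 0 => by simp [h]
  | x :: cc, i + 1 => by simp [modify_id' f h cc i]

-- A's inner loop over one routine bumps slot i of correct_count by the hit count
lemma foldA (r : List Int) (m : Int) (i : Nat) : ∀ (l : List (Int × Int)) (cc : List (Int × Int)),
    l.foldl (fun cc ja =>
        if ja.2 = PySem.List.pyGetD r (PySem.Int.mod ja.1 m) 0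
        then cc.modify i (fun p => (p.1 + 1, p.2)) else cc) cc
      = cc.modify i (fun p => (p.1 + cnt r m l, p.2))
  | [], cc => by
      simp only [List.foldl_nil, cnt, add_zero]
      exact (modify_id' _ (fun p => rfl) cc i).symm
  | ja :: l, cc => by
      simp only [List.foldl_cons, cnt, foldA r m i l]
      split_ifs with h
      · rw [modify_modify]
        congr 1
        funext p
        simp
        omega
      · congr 1
        funext p
        simp

-- B's single pass computes the three hit counts componentwise
lemma foldB : ∀ (l : List (Int × Int)) (s1 s2 s3 : Int),
    l.foldl (fun (s : Int × Int × Int) ja =>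
      (if ja.2 = PySem.List.pyGetD [1, 2, 3, 4, 5] (PySem.Int.mod ja.1 5) 0 then s.1 + 1 else s.1,
       if ja.2 = PySem.List.pyGetD [2, 1, 2, 3, 2, 4, 2, 5] (PySem.Int.mod ja.1 8) 0 then s.2.1 + 1 else s.2.1,
       if ja.2 = PySem.List.pyGetD [3, 3, 1, 1, 2, 2, 4, 4, 5, 5] (PySem.Int.mod ja.1 10) 0 then s.2.2 + 1 else s.2.2))
      (s1, s2, s3)
    = (s1 + cnt [1, 2, 3, 4, 5] 5 l, s2 + cnt [2, 1, 2, 3, 2, 4, 2, 5] 8 l,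
       s3 + cnt [3, 3, 1, 1, 2, 2, 4, 4, 5, 5] 10 l)
  | [], s1, s2, s3 => by simp [cnt]
  | ja :: l, s1, s2, s3 => by
      simp only [List.foldl_cons, cnt, foldB l]
      split_ifs <;> simp <;> omega

set_option maxHeartbeats 2000000 in
-- the selection on three scored slots: A's reverse-sort + tie-pop + sort = B's max-then-filter
lemma select_eq (c1 c2 c3 : Int) :
    (match PySem.List.sorted2 [(c1, (1 : Int)), (c2, 2), (c3, 3)] (·.1) (·.2) true with
     | [] => []
     | top :: rest => PySem.List.sorted (popLoop top.1 rest [top.2]) (fun x => x) false)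
    = ([((1 : Int), c1), (2, c2), (3, c3)].filter
        (fun p => p.2 == max c1 (max c2 c3))).map (·.1) := by
  simp only [PySem.List.sorted2, PySem.List.insertBy, List.foldl,
    Bool.or_eq_true, Bool.and_eq_true, Bool.not_eq_true', decide_eq_true_eq,
    decide_eq_false_iff_not, max_def, List.filter_cons, List.filter_nil,
    beq_iff_eq, List.map_cons, List.map_nil]
  split_ifs <;>
    simp only [popLoop, PySem.List.sorted, PySem.List.insertBy, List.foldl, List.append_eq,
      List.cons_append, List.nil_append, decide_eq_true_eq, List.map_cons, List.map_nil] <;>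
    split_ifs <;>
    repeat' first
      | rfl
      | omega
      | (simp only [popLoop, PySem.List.sorted, PySem.List.insertBy, List.foldl,
          List.cons_append, List.nil_append, decide_eq_true_eq]
         split_ifs)
      | contradiction
      | decide
      | (simp only [Bool.or_eq_true, Bool.and_eq_true, Bool.not_eq_true',
          decide_eq_true_eq, decide_eq_false_iff_not] at *)

-- ===== VERDICT (by name: the statement is the Claim_ definition above) =====
theorem solution_spec : Claim_equal_solution := by
  intro answers _
  unfold Spec_solution solution solution_alt
  have hinit : (PySem.List.pyRange 1 4 1).foldl (fun acc i => acc ++ [((0 : Int), i)]) []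
      = [((0 : Int), (1 : Int)), (0, 2), (0, 3)] := by decide
  have henum : PySem.List.enumerate
      ([[1, 2, 3, 4, 5], [2, 1, 2, 3, 2, 4, 2, 5], [3, 3, 1, 1, 2, 2, 4, 4, 5, 5]] : List (List Int))
      = [((0 : Int), ([1, 2, 3, 4, 5] : List Int)), (1, [2, 1, 2, 3, 2, 4, 2, 5]),
         (2, [3, 3, 1, 1, 2, 2, 4, 4, 5, 5])] := by decide
  simp only [hinit, henum, foldB, List.foldl_cons, List.foldl_nil, foldA]
  show (match PySem.List.sorted2
      [(0 + cnt [1, 2, 3, 4, 5] 5 (PySem.List.enumerate answers), (1 : Int)),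
       (0 + cnt [2, 1, 2, 3, 2, 4, 2, 5] 8 (PySem.List.enumerate answers), 2),
       (0 + cnt [3, 3, 1, 1, 2, 2, 4, 4, 5, 5] 10 (PySem.List.enumerate answers), 3)]
      (·.1) (·.2) true with
    | [] => []
    | top :: rest => PySem.List.sorted (popLoop top.1 rest [top.2]) (fun x => x) false) = _
  rw [select_eq]
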